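-- pv_equiv track=rewrite | github.com/CzmeleN/Uni | SI/l2/zad1.py | old_dist
-- ===== SOURCE A (Python) =====
-- def old_dist(nrs, d):
--     curr = 0
--
--     for i in range(d):
--         if(nrs[i] == 0):
--             curr += 1
--
--     for i in range(d, len(nrs)):
--         curr += nrs[i]
--
--     max = curr
--
--     for i in range(len(nrs) - d):
--         if nrs[i] == 0:
--             curr -= 1
--         else:
--             curr += 1
--
--         if nrs[i + d] == 0:
--             curr += 1
--         else:
--             curr -= 1
--
--         if curr < max:
--             max = curr
--
--     return max
-- ===== SOURCE B (Python) =====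
-- def old_dist(nrs, d):
--     n = len(nrs)
--     pz = [0]
--     for x in nrs:
--         pz.append(pz[-1] + (1 if x == 0 else 0))
--     mz = min(pz[k + d] - pz[k] for k in range(n - d + 1))
--     return sum(nrs[d:]) - pz[d] + 2 * mz
-- ===== Notes on version B (the rewrite author's own statement) =====
-- stated objective: alternative
-- what changed: B replaces A's three index loops and per-element +/-1 running value by a closed-form: it builds a prefix-zero-count list once and returns sum(nrs[d:]) - zeros(first d) + 2*min over all length-d windows of the window's zero count.
import Mathlib
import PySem

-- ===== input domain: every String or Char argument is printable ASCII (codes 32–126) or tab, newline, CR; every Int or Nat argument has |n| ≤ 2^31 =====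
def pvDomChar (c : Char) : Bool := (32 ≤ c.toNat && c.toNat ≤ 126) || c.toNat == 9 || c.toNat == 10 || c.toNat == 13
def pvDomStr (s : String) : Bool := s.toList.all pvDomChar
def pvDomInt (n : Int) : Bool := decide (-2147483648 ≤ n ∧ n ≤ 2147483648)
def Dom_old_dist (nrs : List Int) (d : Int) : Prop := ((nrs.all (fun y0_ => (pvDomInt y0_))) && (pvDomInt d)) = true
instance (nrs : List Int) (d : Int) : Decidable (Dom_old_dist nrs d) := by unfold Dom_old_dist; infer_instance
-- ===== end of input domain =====

-- B is a prefix-zero-count re-implementation: the answer is sum(nrs[d:]) - zeros(first d) + 2*min window zero-count,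
-- so B builds prefix zero counts once and takes a min over windows instead of A's per-element ±1 running value (objective: alternative).

-- ===== PORT A =====
def old_dist (nrs : List Int) (d : Int) : Int :=
  let curr := (PySem.List.pyRange 0 d 1).foldl
    (fun curr i => if PySem.List.pyGetD nrs i 0 = 0 then curr + 1 else curr) 0
  let curr := (PySem.List.pyRange d ((nrs.length : Int)) 1).foldl
    (fun curr i => curr + PySem.List.pyGetD nrs i 0) curr
  let st := (PySem.List.pyRange 0 ((nrs.length : Int) - d) 1).foldl
    (fun (st : Int × Int) i =>
      let curr := if PySem.List.pyGetD nrs i 0 = 0 then st.1 - 1 else st.1 + 1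
      let curr := if PySem.List.pyGetD nrs (i + d) 0 = 0 then curr + 1 else curr - 1
      (curr, if curr < st.2 then curr else st.2))
    (curr, curr)
  st.2

-- ===== PORT B =====
def old_dist_alt (nrs : List Int) (d : Int) : Int :=
  let pz := nrs.foldl
    (fun pz x => pz ++ [PySem.List.pyGetD pz (-1) 0 + (if x = 0 then 1 else 0)]) [(0 : Int)]
  let mz := (PySem.List.min?
      ((PySem.List.pyRange 0 ((nrs.length : Int) - d + 1) 1).map
        (fun k => PySem.List.pyGetD pz (k + d) 0 - PySem.List.pyGetD pz k 0))
      (fun x => x)).getD 0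
  (PySem.List.slice nrs (some d) none).sum - PySem.List.pyGetD pz d 0 + 2 * mz

-- ===== PRECONDITION & SPEC =====
-- A raises IndexError whenever d < 0 or d > len(nrs) (and B raises there too); Pre_ admits exactly the inputs where A returns.
def Pre_old_dist (nrs : List Int) (d : Int) : Prop := 0 ≤ d ∧ d ≤ nrs.length
instance (nrs : List Int) (d : Int) : Decidable (Pre_old_dist nrs d) := by unfold Pre_old_dist; infer_instance
def pvWitness_old_dist : List Int × Int := ([0, 1, 0, 2], 2)
def Spec_old_dist (nrs : List Int) (d : Int) (out : Int) : Prop := out = old_dist_alt nrs d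
instance (nrs : List Int) (d : Int) (out : Int) : Decidable (Spec_old_dist nrs d out) := by unfold Spec_old_dist; infer_instance

-- ===== CLAIM (what is proved, stated in full; the proofs are below) =====
def Claim_equal_old_dist : Prop := ∀ (nrs : List Int) (d : Int), Dom_old_dist nrs d → Pre_old_dist nrs d → Spec_old_dist nrs d (old_dist nrs d)

-- ===== LEMMAS AND PROOFS =====

def pvZ (xs : List Int) : Int := (xs.countP (fun x => decide (x = 0)) : Int)
def pvZk (nrs : List Int) (dn k : Nat) : Int := pvZ ((nrs.drop k).take dn)
def pvRunMin (F : Nat → Int) : Nat → Int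
  | 0 => F 0
  | m + 1 => min (pvRunMin F m) (F (m + 1))
def pvPzTail (c : Int) : List Int → List Int
  | [] => []
  | x :: xs => (c + (if x = 0 then 1 else 0)) :: pvPzTail (c + (if x = 0 then 1 else 0)) xs

theorem pvL8 (nrs : List Int) (dn k : Nat) :
    pvZ (nrs.take (k + dn)) - pvZ (nrs.take k) = pvZk nrs dn k := by
  simp [pvZ, pvZk, List.take_add, List.countP_append]

theorem pvL10 (c : Int) (F : Nat → Int) (m : Nat) :
    pvRunMin (fun k => c + 2 * F k) m = c + 2 * pvRunMin F m := by
  induction m with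
  | zero => simp [pvRunMin]
  | succ m ih => simp [pvRunMin, ih]; omega

theorem pvL9a (F : Nat → Int) : ∀ (m : Nat),
    ((List.range m).map (fun k => F (k + 1))).foldl min (F 0) = pvRunMin F m := by
  intro m
  induction m with
  | zero => simp [pvRunMin]
  | succ m ih => rw [List.range_succ]; simp [pvRunMin, ih]

theorem pvL6 (nrs : List Int) : ∀ (c : Int),
    pvPzTail c nrs = (List.range nrs.length).map (fun k => c + pvZ (nrs.take (k + 1))) := by
  induction nrs with
  | nil => simp [pvPzTail]
  | cons x xs ih =>
    intro c
    simp only [pvPzTail, List.length_cons, List.range_succ_eq_map, List.map_cons, List.map_map]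
    rw [ih]
    refine List.cons_eq_cons.mpr ⟨?_, ?_⟩
    · simp [pvZ, List.countP_cons]
    · apply List.map_congr_left
      intro k _
      simp only [Function.comp, Nat.succ_eq_add_one, List.take_succ_cons, pvZ, List.countP_cons]
      split_ifs with h1 h2 <;> first | (simp_all; done) | omega

theorem pvL5 (xs : List Int) : ∀ (acc : List Int) (h : acc ≠ []),
    xs.foldl (fun pz x => pz ++ [PySem.List.pyGetD pz (-1) 0 + (if x = 0 then 1 else 0)]) acc
      = acc ++ pvPzTail (acc.getLast h) xs := by
  induction xs with
  | nil => intro acc h; simp [pvPzTail]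
  | cons x xs ih =>
    intro acc h
    simp only [List.foldl_cons]
    rw [PySem.List.pyGetD_neg_one (h := h)]
    rw [ih (acc ++ [acc.getLast h + (if x = 0 then 1 else 0)]) (by simp)]
    simp [pvPzTail]

theorem pvL7 (nrs : List Int) (k : Nat) (h : k ≤ nrs.length) :
    PySem.List.pyGetD ((0 : Int) :: pvPzTail 0 nrs) (k : Int) 0 = pvZ (nrs.take k) := by
  rw [PySem.List.pyGetD_natCast]
  cases k with
  | zero => simp [pvZ]
  | succ j =>
    rw [pvL6]
    simp only [List.getD_cons_succ]
    rw [List.getD_eq_getElem _ _ (by simpa using by omega)]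
    simp

theorem pvL2 (nrs : List Int) (dn : Nat) (c : Int) :
    (PySem.List.pyRange (dn : Int) ((nrs.length : Int)) 1).foldl
      (fun curr i => curr + PySem.List.pyGetD nrs i 0) c
      = c + (nrs.drop dn).sum := by
  rw [PySem.List.foldl_pyRange_pyGetD' nrs 0 (fun acc x => acc + x) c (by positivity)]
  rw [PySem.List.foldl_add _ (fun x => x)]
  simp

theorem pvL1 (nrs : List Int) (dn : Nat) (h : dn ≤ nrs.length) :
    (PySem.List.pyRange 0 (dn : Int) 1).foldl
      (fun curr i => if PySem.List.pyGetD nrs i 0 = 0 then curr + 1 else curr) 0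
      = pvZ (nrs.take dn) := by
  have hlen : ((nrs.take dn).length : Int) = (dn : Int) := by simp [List.length_take]; omega
  rw [PySem.List.foldl_congr_mem _ _
    (fun curr i => if PySem.List.pyGetD (nrs.take dn) i 0 = 0 then curr + 1 else curr) _ ?_]
  · rw [← hlen,
      PySem.List.foldl_pyRange_zero_pyGetD' (nrs.take dn) 0 (fun c x => if x = 0 then c + 1 else c) 0]
    rw [PySem.List.foldl_ite_add_one (fun x => x = 0)]
    simp [pvZ]
  · intro acc i hi
    rw [PySem.List.mem_pyRange_one] at hi
    show _ = (if PySem.List.pyGetD (nrs.take dn) i 0 = 0 then acc + 1 else acc)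
    have h1 : PySem.List.pyGetD nrs i 0 = nrs[i.toNat]'(by omega) :=
      PySem.List.pyGetD_eq_getElem _ _ hi.1 (by omega)
    have h2 : PySem.List.pyGetD (nrs.take dn) i 0 = nrs[i.toNat]'(by omega) := by
      rw [PySem.List.pyGetD_eq_getElem _ _ hi.1 (by rw [hlen]; exact hi.2)]
      exact List.getElem_take
    rw [h1, h2]

theorem pvL3 (nrs : List Int) (dn m : Nat) (h : m + dn < nrs.length) :
    pvZk nrs dn (m + 1)
      = pvZk nrs dn m + (if PySem.List.pyGetD nrs ((m : Int) + (dn : Int)) 0 = 0 then 1 else 0)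
          - (if PySem.List.pyGetD nrs (m : Int) 0 = 0 then 1 else 0) := by
  have hg1 : PySem.List.pyGetD nrs ((m : Int) + (dn : Int)) 0 = nrs[m + dn]'h := by
    rw [PySem.List.pyGetD_eq_getElem _ _ (by positivity) (by omega)]
    congr 1
  have hg2 : PySem.List.pyGetD nrs (m : Int) 0 = nrs[m]'(by omega) := by
    rw [PySem.List.pyGetD_eq_getElem _ _ (by positivity) (by omega)]
    congr 1
  rw [hg1, hg2]
  -- window arithmetic on counts
  have e1 : (nrs.drop m).take (dn + 1) = nrs[m]'(by omega) :: (nrs.drop (m + 1)).take dn := by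
    have hd : nrs.drop m = nrs[m]'(by omega) :: nrs.drop (m + 1) :=
      (List.getElem_cons_drop (as := nrs) (i := m) (h := by omega)).symm
    rw [hd, List.take_succ_cons]
  have e2 : (nrs.drop m).take (dn + 1) = (nrs.drop m).take dn ++ [nrs[m + dn]'h] := by
    rw [List.take_add_one]
    congr 1
    rw [List.getElem?_drop]
    rw [List.getElem?_eq_getElem (by omega)]
    simp
  have := congrArg (fun l => (List.countP (fun x => decide (x = 0)) l : Int)) (e1.symm.trans e2)
  simp only [List.countP_cons, List.countP_append] at this
  simp only [pvZk, pvZ]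
  split_ifs with h1 h2 <;> simp_all <;> omega

theorem pvL9 (G : Int → Int) (m : Nat) :
    (PySem.List.min? ((PySem.List.pyRange 0 ((m : Int) + 1) 1).map G) (fun x => x)).getD 0
      = pvRunMin (fun k => G (k : Int)) m := by
  rw [PySem.List.pyRange_one]
  have : ((0 : Int) + 1 - 0).toNat = 1 := by decide
  have hm : (((m : Int) + 1) - 0).toNat = m + 1 := by omega
  rw [hm, List.range_succ_eq_map]
  simp only [List.map_cons, List.map_map]
  rw [PySem.List.min?_id_cons]
  simp only [Option.getD_some]
  have := pvL9a (fun k => G (k : Int)) m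
  rw [← this]
  congr 1
  apply List.map_congr_left
  intro k _
  simp [Nat.succ_eq_add_one]

theorem pvL4 (nrs : List Int) (dn : Nat) (base : Int) : ∀ (m : Nat), m + dn ≤ nrs.length →
    (PySem.List.pyRange 0 (m : Int) 1).foldl
      (fun (st : Int × Int) i =>
        let curr := if PySem.List.pyGetD nrs i 0 = 0 then st.1 - 1 else st.1 + 1
        let curr := if PySem.List.pyGetD nrs (i + (dn : Int)) 0 = 0 then curr + 1 else curr - 1
        (curr, if curr < st.2 then curr else st.2))
      (base + 2 * pvZk nrs dn 0, base + 2 * pvZk nrs dn 0)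
      = (base + 2 * pvZk nrs dn m, pvRunMin (fun k => base + 2 * pvZk nrs dn k) m) := by
  intro m
  induction m with
  | zero =>
    intro _
    rw [PySem.List.pyRange_one_eq_nil (by norm_num)]
    simp [pvRunMin]
  | succ m ih =>
    intro hm
    have hcast : ((m + 1 : Nat) : Int) = (m : Int) + 1 := by push_cast; ring
    rw [hcast, PySem.List.pyRange_one_succ_right (by positivity)]
    rw [List.foldl_append, ih (by omega)]
    simp only [List.foldl_cons, List.foldl_nil]
    have hstep := pvL3 nrs dn m (by omega)
    simp only [Prod.mk.injEq]
    rw [pvRunMin, hstep]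
    constructor <;> split_ifs <;> omega

theorem pvRunMin_congr (F G : Nat → Int) : ∀ (m : Nat), (∀ k, k ≤ m → F k = G k) →
    pvRunMin F m = pvRunMin G m := by
  intro m
  induction m with
  | zero => intro h; simpa [pvRunMin] using h 0 (by omega)
  | succ m ih =>
    intro h
    rw [pvRunMin, pvRunMin, ih (fun k hk => h k (by omega)), h (m + 1) (by omega)]

theorem pvMain (nrs : List Int) (d : Int) (hd0 : 0 ≤ d) (hdn : d ≤ nrs.length) :
    old_dist nrs d = old_dist_alt nrs d := by
  obtain ⟨dn, rfl⟩ : ∃ m : Nat, d = (m : Int) := ⟨d.toNat, (Int.toNat_of_nonneg hd0).symm⟩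
  have hdle : dn ≤ nrs.length := by exact_mod_cast hdn
  simp only [old_dist, old_dist_alt]
  rw [pvL1 nrs dn hdle, pvL2]
  rw [pvL5 nrs [0] (by simp)]
  simp only [List.getLast_singleton, List.singleton_append]
  have hr : ((nrs.length : Int) - (dn : Int)) = ((nrs.length - dn : Nat) : Int) := by omega
  rw [hr]
  rw [show pvZ (nrs.take dn) + (nrs.drop dn).sum
        = ((nrs.drop dn).sum - pvZ (nrs.take dn)) + 2 * pvZk nrs dn 0 from by
      simp only [pvZk, List.drop_zero]; ring]
  rw [pvL4 nrs dn ((nrs.drop dn).sum - pvZ (nrs.take dn)) (nrs.length - dn) (by omega)]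
  rw [pvL10]
  rw [PySem.List.slice_from_natCast]
  rw [pvL7 nrs dn hdle]
  rw [pvL9]
  have hcong : ∀ k, k ≤ nrs.length - dn →
      PySem.List.pyGetD ((0 : Int) :: pvPzTail 0 nrs) ((k : Nat) + (dn : Int)) 0
        - PySem.List.pyGetD ((0 : Int) :: pvPzTail 0 nrs) (k : Nat) 0 = pvZk nrs dn k := by
    intro k hk
    rw [show ((k : Nat) + (dn : Int) : Int) = ((k + dn : Nat) : Int) from by push_cast; ring]
    rw [pvL7 nrs (k + dn) (by omega), pvL7 nrs k (by omega), pvL8]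
  rw [pvRunMin_congr _ (fun k => pvZk nrs dn k) (nrs.length - dn) hcong]

-- ===== VERDICT (by name: the statement is the Claim_ definition above) =====
theorem old_dist_spec : Claim_equal_old_dist := by
  intro nrs d _ hpre
  exact pvMain nrs d hpre.1 hpre.2
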